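-- pv_equiv track=rewrite | github.com/daniel-zeiler/potential-happiness | array_problems/Solutions.py | largest_parameter
-- ===== SOURCE A (Python) =====
-- def largest_parameter(input):
--     def check_directions(x, y):
--         valid_directions = []
--         on_parimeter = False
--         directions = [[-1, 0], [0, -1], [1, 0], [0, 1]]
--         for x_direction, y_direction in directions:
--             new_x = x + x_direction
--             new_y = y + y_direction
--             if 0 <= new_x < len(input) and 0 <= new_y < len(input[0]):
--                 if input[new_x][new_y] == 1:
--                     valid_directions.append([new_x, new_y])
--                 elif input[new_x][new_y] == 0:
--                     on_parimeter = True
--             else: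
--                 on_parimeter = True
--         return on_parimeter, valid_directions
--
--     def gather_perimeter_size(x, y):
--         if input[x][y] == 1:
--             input[x][y] = -1
--             on_parimeter = 0
--             parameter, new_directions = check_directions(x, y)
--
--             if parameter:
--                 on_parimeter += 1
--             if new_directions:
--                 for new_x, new_y in new_directions:
--                     size = gather_perimeter_size(new_x, new_y)
--                     on_parimeter += size
--             return on_parimeter
--         return 0
--
--     max_parameter = 0
--     for x, row in enumerate(input):
--         for y, value in enumerate(row):
--             if input[x][y] == 1:
--                 max_parameter = max(max_parameter, gather_perimeter_size(x, y))
--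
--     return max_parameter
-- ===== SOURCE B (Python) =====
-- def largest_parameter(input):
--     best = 0
--     rows = len(input)
--     cols = len(input[0]) if input else 0
--     for x in range(rows):
--         for y in range(len(input[x])):
--             if input[x][y] == 1:
--                 per = 0
--                 stack = [(x, y)]
--                 while stack:
--                     cx, cy = stack.pop()
--                     if input[cx][cy] != 1:
--                         continue
--                     input[cx][cy] = -1
--                     boundary = False
--                     for dx, dy in ((0, 1), (1, 0), (0, -1), (-1, 0)):
--                         nx, ny = cx + dx, cy + dy
--                         if 0 <= nx < rows and 0 <= ny < cols:
--                             if input[nx][ny] == 1: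
--                                 stack.append((nx, ny))
--                             elif input[nx][ny] == 0:
--                                 boundary = True
--                         else:
--                             boundary = True
--                     if boundary:
--                         per += 1
--                 best = max(best, per)
--     return best
-- ===== Notes on version B (the rewrite author's own statement) =====
-- stated objective: alternative
-- what changed: A's recursive flood fill (helper functions gather_perimeter_size/check_directions, one recursive call per neighbour) is replaced by a single explicit stack-based loop that iteratively marks each reached 1 as -1 and accumulates the boundary-cell count, eliminating recursion (and its RecursionError risk on large components); the in-place mutation of the grid is identical.
-- outside the precondition, e.g. on largest_parameter([[1, 0], [0]]): A returns 1, B returns 1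
import Mathlib
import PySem

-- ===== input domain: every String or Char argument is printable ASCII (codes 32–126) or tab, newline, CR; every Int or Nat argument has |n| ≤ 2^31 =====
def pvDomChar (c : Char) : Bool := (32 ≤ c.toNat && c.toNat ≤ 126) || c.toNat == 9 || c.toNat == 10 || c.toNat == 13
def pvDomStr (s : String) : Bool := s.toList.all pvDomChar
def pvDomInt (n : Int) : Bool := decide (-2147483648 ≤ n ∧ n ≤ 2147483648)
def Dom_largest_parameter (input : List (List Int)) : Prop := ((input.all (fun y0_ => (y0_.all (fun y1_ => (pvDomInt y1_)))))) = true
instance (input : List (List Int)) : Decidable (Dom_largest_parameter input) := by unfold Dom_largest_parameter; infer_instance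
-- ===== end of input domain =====

-- B replaces A's recursive flood fill by an explicit stack loop (same marking of each visited 1 to -1,
-- so the in-place mutation of the argument is the same); the equivalence is about the returned value.

-- ===== PORT A =====
-- Shared cell primitives (used by both ports).
-- pvGetC: reads input[x][y]; exact for the nonnegative indices at which either Python reads a cell
-- (every read is behind a 0 ≤ bound check or uses a loop index), none when out of range.
def pvGetC (g : List (List Int)) (x y : Int) : Option Int :=
  if 0 ≤ x ∧ 0 ≤ y then (g[x.toNat]?).bind (fun r => r[y.toNat]?) else none

-- pvSetC: input[x][y] = v (both Pythons only assign at a cell just read as 1, hence in range, nonnegative).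
def pvSetC (g : List (List Int)) (x y v : Int) : List (List Int) :=
  g.set x.toNat ((g.getD x.toNat []).set y.toNat v)

def pvDirs : List (Int × Int) := [(-1, 0), (0, -1), (1, 0), (0, 1)]

-- A's bounds test  0 <= new_x < len(input) and 0 <= new_y < len(input[0])
def pvInB (g : List (List Int)) (x y : Int) : Bool :=
  decide (0 ≤ x) && decide (x < (g.length : Int)) && decide (0 ≤ y) && decide (y < ((g.headD []).length : Int))

-- A's check_directions
def pvCheck (g : List (List Int)) (x y : Int) : Bool × List (Int × Int) :=
  pvDirs.foldl (fun (st : Bool × List (Int × Int)) d =>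
    let nx := x + d.1
    let ny := y + d.2
    if pvInB g nx ny then
      if pvGetC g nx ny = some 1 then (st.1, st.2 ++ [(nx, ny)])
      else if pvGetC g nx ny = some 0 then (true, st.2)
      else st
    else (true, st.2)) (false, [])

-- A's gather_perimeter_size; the Nat argument is fuel, a totality guard only (the top-level call
-- passes enough fuel for the recursion to run exactly as the Python's does).
mutual
def pvGather : Nat → List (List Int) → Int → Int → Int × List (List Int)
  | 0, g, _, _ => (0, g)
  | n + 1, g, x, y =>
    if pvGetC g x y = some 1 then
      let g1 := pvSetC g x y (-1)
      let pr := pvCheck g1 x y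
      let base : Int := if pr.1 then 1 else 0
      let r := pvGatherList n g1 pr.2
      (base + r.1, r.2)
    else (0, g)
termination_by n g x y => (n, 0)

def pvGatherList : Nat → List (List Int) → List (Int × Int) → Int × List (List Int)
  | _, g, [] => (0, g)
  | n, g, c :: cs =>
    let r1 := pvGather n g c.1 c.2
    let r2 := pvGatherList n r1.2 cs
    (r1.1 + r2.1, r2.2)
termination_by n g l => (n, l.length + 1)
end

def pvCells (g : List (List Int)) : Nat := (g.map List.length).sum

def largest_parameter (input : List (List Int)) : Int :=
  ((List.range input.length).foldl (fun (st : Int × List (List Int)) x =>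
      (List.range ((input.getD x []).length)).foldl (fun (st : Int × List (List Int)) y =>
          if pvGetC st.2 (x : Int) y = some 1 then
            let r := pvGather (pvCells input + 1) st.2 (x : Int) y
            (max st.1 r.1, r.2)
          else st) st)
    ((0 : Int), input)).1

-- ===== PORT B =====
-- B's direction tuple (pushed onto the stack in this order, so they are popped in A's order)
def pvDirsRev : List (Int × Int) := [(0, 1), (1, 0), (0, -1), (-1, 0)]

-- the body of B's `for dx, dy in …` loop: computes the boundary flag and pushes the 1-neighbours
def pvPush (g : List (List Int)) (cx cy : Int) (st : List (Int × Int)) : Bool × List (Int × Int) :=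
  pvDirsRev.foldl (fun (p : Bool × List (Int × Int)) d =>
    let nx := cx + d.1
    let ny := cy + d.2
    if pvInB g nx ny then
      if pvGetC g nx ny = some 1 then (p.1, (nx, ny) :: p.2)
      else if pvGetC g nx ny = some 0 then (true, p.2)
      else p
    else (true, p.2)) (false, st)

-- B's `while stack:` loop (the Python stack's top is the list end; here the top is the list head).
-- The Nat argument is fuel, a totality guard only; the top-level call passes enough.
def pvStack : Nat → List (List Int) → List (Int × Int) → Int × List (List Int)
  | 0, g, _ => (0, g)
  | _ + 1, g, [] => (0, g)
  | n + 1, g, c :: st =>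
    if pvGetC g c.1 c.2 = some 1 then
      let g1 := pvSetC g c.1 c.2 (-1)
      let bs := pvPush g1 c.1 c.2 st
      let r := pvStack n g1 bs.2
      ((if bs.1 then 1 else 0) + r.1, r.2)
    else pvStack n g st

def largest_parameter_alt (input : List (List Int)) : Int :=
  ((List.range input.length).foldl (fun (st : Int × List (List Int)) x =>
      (List.range ((input.getD x []).length)).foldl (fun (st : Int × List (List Int)) y =>
          if pvGetC st.2 (x : Int) y = some 1 then
            let r := pvStack (4 * pvCells input + 2) st.2 [((x : Int), y)]
            (max st.1 r.1, r.2)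
          else st) st)
    ((0 : Int), input)).1

-- ===== PRECONDITION & SPEC =====
-- Pre_ excludes exactly the ragged grids on which A's neighbour access input[new_x][new_y]
-- (bounds-checked against len(input[0]) but applied to a possibly shorter row) can raise IndexError:
-- kept are grids whose rows are all at least as long as row 0, and grids containing no 1 (where no
-- flood fill ever starts).  On a few of the excluded ragged grids A happens to return anyway.
def Pre_largest_parameter (input : List (List Int)) : Prop :=
  (∀ r ∈ input, (input.headD []).length ≤ r.length) ∨ (∀ r ∈ input, ∀ v ∈ r, v ≠ 1)
instance (input : List (List Int)) : Decidable (Pre_largest_parameter input) := by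
  unfold Pre_largest_parameter; infer_instance

def pvWitness_largest_parameter : List (List Int) := [[1, 1, 0], [0, 1, 0]]

def Spec_largest_parameter (input : List (List Int)) (out : Int) : Prop := out = largest_parameter_alt input
instance (input : List (List Int)) (out : Int) : Decidable (Spec_largest_parameter input out) := by unfold Spec_largest_parameter; infer_instance

-- ===== CLAIM (what is proved, stated in full; the proofs are below) =====
def Claim_equal_largest_parameter : Prop := ∀ (input : List (List Int)), Dom_largest_parameter input → Pre_largest_parameter input → Spec_largest_parameter input (largest_parameter input)

-- ===== LEMMAS AND PROOFS =====

-- number of 1-cells: the termination measure of the flood fill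
def pvOnes (g : List (List Int)) : Nat := (g.map (fun r => r.count 1)).sum

theorem pv_count_set_lt {r : List Int} {i : Nat} (h : r[i]? = some 1) :
    (r.set i (-1)).count 1 < r.count 1 := by
  induction r generalizing i with
  | nil => simp at h
  | cons a t ih =>
    cases i with
    | zero =>
      simp at h
      subst h
      simp [List.count_cons]
    | succ j =>
      simp at h
      have := ih h
      simp [List.count_cons]
      omega

theorem pv_ones_set_row {g : List (List Int)} {i : Nat} {r : List Int} (h : g[i]? = some r)
    (r' : List Int) :
    pvOnes (g.set i r') + r.count 1 = pvOnes g + r'.count 1 := by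
  induction g generalizing i with
  | nil => simp at h
  | cons a t ih =>
    cases i with
    | zero =>
      simp at h; subst h
      simp [pvOnes]
      omega
    | succ j =>
      simp at h
      have := ih h
      simp [pvOnes] at this ⊢
      omega

theorem pv_ones_set_lt {g : List (List Int)} {x y : Int} (h : pvGetC g x y = some 1) :
    pvOnes (pvSetC g x y (-1)) < pvOnes g := by
  unfold pvGetC at h
  split at h
  · obtain ⟨r, hr, hy⟩ := Option.bind_eq_some_iff.mp h
    have hset : pvSetC g x y (-1) = g.set x.toNat (r.set y.toNat (-1)) := by
      unfold pvSetC
      congr 1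
      rw [List.getD_eq_getElem?_getD, hr]
      rfl
    have h1 := pv_ones_set_row hr (r.set y.toNat (-1))
    have h2 := pv_count_set_lt hy
    rw [hset]
    omega
  · exact absurd h (by simp)

-- ones is non-increasing through the recursive fill
theorem pvGatherList_ones (n : Nat)
    (hg : ∀ g x y, pvOnes (pvGather n g x y).2 ≤ pvOnes g) :
    ∀ l g, pvOnes (pvGatherList n g l).2 ≤ pvOnes g := by
  intro l
  induction l with
  | nil => intro g; cases n <;> simp [pvGatherList]
  | cons c cs ih =>
    intro g
    have h1 := hg g c.1 c.2
    have h2 := ih (pvGather n g c.1 c.2).2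
    calc pvOnes (pvGatherList n g (c :: cs)).2
        = pvOnes (pvGatherList n (pvGather n g c.1 c.2).2 cs).2 := by
          cases n <;> simp [pvGatherList]
      _ ≤ pvOnes g := le_trans h2 h1

theorem pvGather_ones : ∀ n : Nat, ∀ g x y, pvOnes (pvGather n g x y).2 ≤ pvOnes g := by
  intro n
  induction n with
  | zero => intro g x y; simp [pvGather]
  | succ m ih =>
    intro g x y
    by_cases h : pvGetC g x y = some 1
    · have hlt := pv_ones_set_lt h
      have hl := pvGatherList_ones m ih (pvCheck (pvSetC g x y (-1)) x y).2 (pvSetC g x y (-1))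
      simp only [pvGather, h, if_pos]
      omega
    · simp [pvGather, h]

-- fuel does not matter once it exceeds the number of 1-cells  (gather side)
theorem pvGatherList_irrel (n m : Nat) (hnm : n ≤ m)
    (hg : ∀ g x y, pvOnes g < n → pvGather n g x y = pvGather m g x y) :
    ∀ l g, pvOnes g < n → pvGatherList n g l = pvGatherList m g l := by
  intro l
  induction l with
  | nil => intro g _; cases n <;> cases m <;> simp [pvGatherList]
  | cons c cs ih =>
    intro g hlt
    have e1 := hg g c.1 c.2 hlt
    have h1 : pvOnes (pvGather n g c.1 c.2).2 ≤ pvOnes g := pvGather_ones n g c.1 c.2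
    have e2 := ih (pvGather n g c.1 c.2).2 (lt_of_le_of_lt h1 hlt)
    cases n with
    | zero => omega
    | succ n' =>
      cases m with
      | zero => omega
      | succ m' =>
        simp only [pvGatherList]
        rw [e1] at e2 ⊢
        rw [e2]

theorem pvGather_irrel : ∀ n m : Nat, n ≤ m → ∀ g x y, pvOnes g < n → pvGather n g x y = pvGather m g x y := by
  intro n
  induction n with
  | zero => intro m _ g x y h; omega
  | succ n' ih =>
    intro m hnm g x y hlt
    cases m with
    | zero => omega
    | succ m' =>
      by_cases h : pvGetC g x y = some 1
      · have hone := pv_ones_set_lt h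
        have hl : pvOnes (pvSetC g x y (-1)) < n' := by omega
        have := pvGatherList_irrel n' m' (by omega) (fun g x y hh => ih m' (by omega) g x y hh)
          (pvCheck (pvSetC g x y (-1)) x y).2 (pvSetC g x y (-1)) hl
        simp only [pvGather, h, if_pos]
        rw [this]
      · simp [pvGather, h]

-- characterisation of the two direction loops: boundary flag and list of pushed 1-neighbours
def pvFlagF (g : List (List Int)) (x y : Int) (d : Int × Int) : Bool :=
  if pvInB g (x + d.1) (y + d.2) then
    (if pvGetC g (x + d.1) (y + d.2) = some 1 then false
     else decide (pvGetC g (x + d.1) (y + d.2) = some 0))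
  else true

def pvPushF (g : List (List Int)) (x y : Int) (d : Int × Int) : Option (Int × Int) :=
  if pvInB g (x + d.1) (y + d.2) = true ∧ pvGetC g (x + d.1) (y + d.2) = some 1
  then some (x + d.1, y + d.2) else none

theorem pvCheck_char (g : List (List Int)) (x y : Int) :
    ∀ (ds : List (Int × Int)) (b : Bool) (acc : List (Int × Int)),
    ds.foldl (fun (st : Bool × List (Int × Int)) d =>
      let nx := x + d.1
      let ny := y + d.2
      if pvInB g nx ny then
        if pvGetC g nx ny = some 1 then (st.1, st.2 ++ [(nx, ny)])
        else if pvGetC g nx ny = some 0 then (true, st.2)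
        else st
      else (true, st.2)) (b, acc)
    = (b || ds.any (pvFlagF g x y), acc ++ ds.filterMap (pvPushF g x y)) := by
  intro ds
  induction ds with
  | nil => intro b acc; simp
  | cons d ds ih =>
    intro b acc
    simp only [List.foldl_cons, List.any_cons, List.filterMap_cons]
    by_cases hib : pvInB g (x + d.1) (y + d.2) = true
    · by_cases h1 : pvGetC g (x + d.1) (y + d.2) = some 1
      · rw [if_pos hib, if_pos h1, ih]
        simp [pvFlagF, pvPushF, hib, h1]
      · by_cases h0 : pvGetC g (x + d.1) (y + d.2) = some 0
        · rw [if_pos hib, if_neg h1, if_pos h0, ih]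
          simp [pvFlagF, pvPushF, hib, h1, h0]
        · rw [if_pos hib, if_neg h1, if_neg h0, ih]
          simp [pvFlagF, pvPushF, hib, h1, h0]
    · rw [if_neg hib, ih]
      simp [pvFlagF, pvPushF, hib]

theorem pvPush_char (g : List (List Int)) (x y : Int) :
    ∀ (ds : List (Int × Int)) (b : Bool) (st : List (Int × Int)),
    ds.foldl (fun (p : Bool × List (Int × Int)) d =>
      let nx := x + d.1
      let ny := y + d.2
      if pvInB g nx ny then
        if pvGetC g nx ny = some 1 then (p.1, (nx, ny) :: p.2)
        else if pvGetC g nx ny = some 0 then (true, p.2)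
        else p
      else (true, p.2)) (b, st)
    = (b || ds.any (pvFlagF g x y), (ds.filterMap (pvPushF g x y)).reverse ++ st) := by
  intro ds
  induction ds with
  | nil => intro b st; simp
  | cons d ds ih =>
    intro b st
    simp only [List.foldl_cons, List.any_cons, List.filterMap_cons]
    by_cases hib : pvInB g (x + d.1) (y + d.2) = true
    · by_cases h1 : pvGetC g (x + d.1) (y + d.2) = some 1
      · rw [if_pos hib, if_pos h1, ih]
        simp [pvFlagF, pvPushF, hib, h1]
      · by_cases h0 : pvGetC g (x + d.1) (y + d.2) = some 0
        · rw [if_pos hib, if_neg h1, if_pos h0, ih]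
          simp [pvFlagF, pvPushF, hib, h1, h0]
        · rw [if_pos hib, if_neg h1, if_neg h0, ih]
          simp [pvFlagF, pvPushF, hib, h1, h0]
    · rw [if_neg hib, ih]
      simp [pvFlagF, pvPushF, hib]

theorem pvCheck_eq (g : List (List Int)) (x y : Int) :
    pvCheck g x y = (pvDirs.any (pvFlagF g x y), pvDirs.filterMap (pvPushF g x y)) := by
  unfold pvCheck
  rw [pvCheck_char g x y pvDirs false []]
  simp

theorem pvDirsRev_eq : pvDirsRev = pvDirs.reverse := by rfl

theorem pvPush_eq (g : List (List Int)) (x y : Int) (st : List (Int × Int)) :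
    pvPush g x y st = ((pvCheck g x y).1, (pvCheck g x y).2 ++ st) := by
  unfold pvPush
  rw [pvPush_char g x y pvDirsRev false st, pvCheck_eq, pvDirsRev_eq]
  simp [List.filterMap_reverse]

theorem pvCheck_len (g : List (List Int)) (x y : Int) : (pvCheck g x y).2.length ≤ 4 := by
  rw [pvCheck_eq]
  have := List.length_filterMap_le (pvPushF g x y) pvDirs
  simpa [pvDirs] using this

-- stack side: fuel irrelevance
theorem pvStack_irrel : ∀ n m : Nat, n ≤ m → ∀ g st, st.length + 4 * pvOnes g < n →
    pvStack n g st = pvStack m g st := by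
  intro n
  induction n with
  | zero => intro m _ g st h; omega
  | succ n' ih =>
    intro m hnm g st hlt
    cases m with
    | zero => omega
    | succ m' =>
      cases st with
      | nil => simp [pvStack]
      | cons c st' =>
        rw [List.length_cons] at hlt
        by_cases h : pvGetC g c.1 c.2 = some 1
        · have hone := pv_ones_set_lt h
          have hlen : (pvPush (pvSetC g c.1 c.2 (-1)) c.1 c.2 st').2.length ≤ 4 + st'.length := by
            rw [pvPush_eq]
            have := pvCheck_len (pvSetC g c.1 c.2 (-1)) c.1 c.2
            simp
            omega
          have := ih m' (by omega) (pvSetC g c.1 c.2 (-1))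
            (pvPush (pvSetC g c.1 c.2 (-1)) c.1 c.2 st').2 (by omega)
          simp only [pvStack, h, if_pos]
          rw [this]
        · simp only [pvStack, h, ite_false]
          exact ih m' (by omega) g st' (by omega)

-- canonical (fuel-free) versions
def pvGatherC (g : List (List Int)) (c : Int × Int) : Int × List (List Int) :=
  pvGather (pvOnes g + 1) g c.1 c.2
def pvGatherListC (g : List (List Int)) (l : List (Int × Int)) : Int × List (List Int) :=
  pvGatherList (pvOnes g + 1) g l
def pvStackC (g : List (List Int)) (st : List (Int × Int)) : Int × List (List Int) :=
  pvStack (st.length + 4 * pvOnes g + 1) g st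

theorem pvGatherC_eq (g : List (List Int)) (x y : Int) {n : Nat} (h : pvOnes g < n) :
    pvGather n g x y = pvGatherC g (x, y) := by
  unfold pvGatherC
  rcases le_total n (pvOnes g + 1) with hle | hle
  · exact pvGather_irrel n (pvOnes g + 1) hle g x y h
  · exact (pvGather_irrel (pvOnes g + 1) n hle g x y (by omega)).symm

theorem pvStackC_eq (g : List (List Int)) (st : List (Int × Int)) {n : Nat}
    (h : st.length + 4 * pvOnes g < n) :
    pvStack n g st = pvStackC g st := by
  unfold pvStackC
  rcases le_total n (st.length + 4 * pvOnes g + 1) with hle | hle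
  · exact pvStack_irrel n _ hle g st h
  · exact (pvStack_irrel _ n hle g st (by omega)).symm

theorem pvGatherListC_eq (g : List (List Int)) (l : List (Int × Int)) {n : Nat} (h : pvOnes g < n) :
    pvGatherList n g l = pvGatherListC g l := by
  unfold pvGatherListC
  rcases le_total n (pvOnes g + 1) with hle | hle
  · exact pvGatherList_irrel n _ hle (fun g' x y hh => pvGather_irrel n _ hle g' x y hh) l g h
  · exact (pvGatherList_irrel _ n hle (fun g' x y hh => pvGather_irrel _ n hle g' x y hh) l g (by omega)).symm

theorem pvGatherC_ones (g : List (List Int)) (c : Int × Int) :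
    pvOnes (pvGatherC g c).2 ≤ pvOnes g := pvGather_ones _ g c.1 c.2

-- recurrences of the canonical versions
theorem pvGatherC_rec (g : List (List Int)) (c : Int × Int) :
    pvGatherC g c =
      if pvGetC g c.1 c.2 = some 1 then
        ((if (pvCheck (pvSetC g c.1 c.2 (-1)) c.1 c.2).1 then (1:Int) else 0)
           + (pvGatherListC (pvSetC g c.1 c.2 (-1)) (pvCheck (pvSetC g c.1 c.2 (-1)) c.1 c.2).2).1,
         (pvGatherListC (pvSetC g c.1 c.2 (-1)) (pvCheck (pvSetC g c.1 c.2 (-1)) c.1 c.2).2).2)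
      else (0, g) := by
  by_cases h : pvGetC g c.1 c.2 = some 1
  · have hone := pv_ones_set_lt h
    rw [if_pos h]
    unfold pvGatherC
    simp only [pvGather, h, if_pos]
    rw [pvGatherListC_eq _ _ (n := pvOnes g) hone]
  · rw [if_neg h]
    unfold pvGatherC
    simp [pvGather, h]

theorem pvGatherListC_nil (g : List (List Int)) : pvGatherListC g [] = (0, g) := by
  simp [pvGatherListC, pvGatherList]

theorem pvGatherListC_cons (g : List (List Int)) (c : Int × Int) (cs : List (Int × Int)) :
    pvGatherListC g (c :: cs) =
      ((pvGatherC g c).1 + (pvGatherListC (pvGatherC g c).2 cs).1,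
       (pvGatherListC (pvGatherC g c).2 cs).2) := by
  unfold pvGatherListC pvGatherC
  simp only [pvGatherList]
  rw [pvGatherListC_eq _ cs (n := pvOnes g + 1)
    (by have := pvGather_ones (pvOnes g + 1) g c.1 c.2; omega)]
  rfl

theorem pvStackC_nil (g : List (List Int)) : pvStackC g [] = (0, g) := by
  simp [pvStackC, pvStack]

theorem pvStackC_cons (g : List (List Int)) (c : Int × Int) (st : List (Int × Int)) :
    pvStackC g (c :: st) =
      if pvGetC g c.1 c.2 = some 1 then
        ((if (pvPush (pvSetC g c.1 c.2 (-1)) c.1 c.2 st).1 then (1:Int) else 0)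
           + (pvStackC (pvSetC g c.1 c.2 (-1)) (pvPush (pvSetC g c.1 c.2 (-1)) c.1 c.2 st).2).1,
         (pvStackC (pvSetC g c.1 c.2 (-1)) (pvPush (pvSetC g c.1 c.2 (-1)) c.1 c.2 st).2).2)
      else pvStackC g st := by
  by_cases h : pvGetC g c.1 c.2 = some 1
  · have hone := pv_ones_set_lt h
    rw [if_pos h]
    unfold pvStackC
    simp only [List.length_cons, pvStack, h, if_pos]
    rw [pvStackC_eq _ _ (n := st.length + 1 + 4 * pvOnes g)
      (by rw [pvPush_eq]; have := pvCheck_len (pvSetC g c.1 c.2 (-1)) c.1 c.2; simp; omega)]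
    unfold pvStackC
    rfl
  · rw [if_neg h]
    unfold pvStackC
    simp only [List.length_cons, pvStack, h, ite_false]
    exact pvStackC_eq g st (by omega)

-- THE BRIDGE: the stack loop processes its top exactly as one recursive gather call
theorem pvBridge : ∀ k : Nat, ∀ g, pvOnes g < k → ∀ c st,
    pvStackC g (c :: st) =
      ((pvGatherC g c).1 + (pvStackC (pvGatherC g c).2 st).1,
       (pvStackC (pvGatherC g c).2 st).2) := by
  intro k
  induction k with
  | zero => intro g h; omega
  | succ k' ih =>
    intro g hg c st
    by_cases h : pvGetC g c.1 c.2 = some 1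
    · have hone := pv_ones_set_lt h
      rw [pvStackC_cons, pvGatherC_rec]
      rw [if_pos h, if_pos h]
      rw [pvPush_eq]
      have main : ∀ l (g' : List (List Int)), pvOnes g' < pvOnes g → ∀ st',
          pvStackC g' (l ++ st') =
            ((pvGatherListC g' l).1 + (pvStackC (pvGatherListC g' l).2 st').1,
             (pvStackC (pvGatherListC g' l).2 st').2) := by
        intro l
        induction l with
        | nil =>
          intro g' _ st'
          rw [pvGatherListC_nil]
          simp
        | cons c' l' ihl =>
          intro g' hg' st'
          rw [List.cons_append, ih g' (by omega) c' (l' ++ st')]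
          rw [ihl (pvGatherC g' c').2 (by have := pvGatherC_ones g' c'; omega) st']
          rw [pvGatherListC_cons]
          simp [add_assoc]
      rw [main (pvCheck (pvSetC g c.1 c.2 (-1)) c.1 c.2).2 (pvSetC g c.1 c.2 (-1)) hone st]
      simp [add_assoc]
    · rw [pvStackC_cons, pvGatherC_rec]
      rw [if_neg h, if_neg h]
      simp

theorem pvPerCell (g : List (List Int)) (c : Int × Int) : pvStackC g [c] = pvGatherC g c := by
  rw [pvBridge (pvOnes g + 1) g (by omega) c []]
  simp [pvStackC_nil]

theorem pvOnes_le_cells (g : List (List Int)) : pvOnes g ≤ pvCells g := by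
  induction g with
  | nil => simp [pvOnes, pvCells]
  | cons r t ih =>
    simp only [pvOnes, pvCells, List.map_cons, List.sum_cons] at ih ⊢
    have := List.count_le_length (l := r) (a := (1:Int))
    omega

theorem pv_foldl_congr_inv {α σ : Type} (P : σ → Prop) (f g : σ → α → σ) (l : List α) (s : σ)
    (hs : P s) (hfg : ∀ s a, P s → f s a = g s a) (hP : ∀ s a, P s → P (f s a)) :
    l.foldl f s = l.foldl g s := by
  induction l generalizing s with
  | nil => rfl
  | cons a t ih =>
    simp only [List.foldl]
    rw [← hfg s a hs]
    exact ih (f s a) (hP s a hs)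

theorem pv_foldl_inv {α σ : Type} (P : σ → Prop) (f : σ → α → σ) (l : List α) (s : σ)
    (hs : P s) (hP : ∀ s a, P s → P (f s a)) : P (l.foldl f s) := by
  induction l generalizing s with
  | nil => exact hs
  | cons a t ih => exact ih (f s a) (hP s a hs)

-- ===== VERDICT (by name: the statement is the Claim_ definition above) =====
theorem largest_parameter_spec : Claim_equal_largest_parameter := by
  intro input hD hP
  unfold Spec_largest_parameter largest_parameter largest_parameter_alt
  congr 1
  have hcell := pvOnes_le_cells input
  have hAstep : ∀ (s : Int × List (List Int)) (x : Nat) (y : Int), pvOnes s.2 ≤ pvOnes input →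
      (if pvGetC s.2 (x : Int) y = some 1 then
          ((max s.1 (pvGather (pvCells input + 1) s.2 (x : Int) y).1,
            (pvGather (pvCells input + 1) s.2 (x : Int) y).2) : Int × List (List Int))
        else s)
      = (if pvGetC s.2 (x : Int) y = some 1 then
          (max s.1 (pvStack (4 * pvCells input + 2) s.2 [((x : Int), y)]).1,
            (pvStack (4 * pvCells input + 2) s.2 [((x : Int), y)]).2)
        else s) := by
    intro s x y hs
    by_cases h : pvGetC s.2 (x : Int) y = some 1
    · rw [if_pos h, if_pos h]
      rw [pvGatherC_eq s.2 (x : Int) y (n := pvCells input + 1) (by omega)]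
      rw [pvStackC_eq s.2 [((x : Int), y)] (n := 4 * pvCells input + 2)
        (by rw [List.length_singleton]; omega)]
      rw [pvPerCell]
    · rw [if_neg h, if_neg h]
  have hApres : ∀ (s : Int × List (List Int)) (x : Nat) (y : Int), pvOnes s.2 ≤ pvOnes input →
      pvOnes (if pvGetC s.2 (x : Int) y = some 1 then
          ((max s.1 (pvGather (pvCells input + 1) s.2 (x : Int) y).1,
            (pvGather (pvCells input + 1) s.2 (x : Int) y).2) : Int × List (List Int))
        else s).2 ≤ pvOnes input := by
    intro s x y hs
    by_cases h : pvGetC s.2 (x : Int) y = some 1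
    · rw [if_pos h]
      exact le_trans (pvGather_ones (pvCells input + 1) s.2 (x : Int) y) hs
    · rw [if_neg h]; exact hs
  apply pv_foldl_congr_inv (P := fun st => pvOnes st.2 ≤ pvOnes input)
  · exact le_refl _
  · intro s x hs
    apply pv_foldl_congr_inv (P := fun st => pvOnes st.2 ≤ pvOnes input)
    · exact hs
    · intro s' y hs'
      exact hAstep s' x y hs'
    · intro s' y hs'
      exact hApres s' x y hs'
  · intro s x hs
    refine pv_foldl_inv (P := fun (st : Int × List (List Int)) => pvOnes st.2 ≤ pvOnes input)
      _ _ _ hs ?_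
    intro s' y hs'
    exact hApres s' x y hs'
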